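-- pv_equiv track=rewrite | github.com/zibengou/soduku | testsoduku.py | removeImpossible
-- ===== SOURCE A (Python) =====
-- def removeImpossible(testRect, rect):
-- 	newRect = [i for i in rect]
-- 	for line in rect:
-- 		remove = 0
-- 		for testLine in testRect:
-- 			if testLine[0] == line[0] or testLine[1] == line[1] or testLine[2] == line[2] or testLine[3] == line[3]:
-- 				newRect.remove(line)
-- 				break
-- 	noConflictNumList = [i for i in newRect]
-- 	for i in range(len(newRect)):
-- 		for j in range(i+1,len(newRect)):
-- 			iline = newRect[i]
-- 			jline = newRect[j]
-- 			if iline[0] == jline[0] or iline[1] == jline[1] or iline[2] == jline[2] or iline[3] == jline[3]: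
-- 				if iline in noConflictNumList:
-- 					noConflictNumList.remove(iline)
-- 				if jline in noConflictNumList:
-- 					noConflictNumList.remove(jline)
-- 				break
-- 	newTestRect = [i for i in testRect] + noConflictNumList
-- 	for i in noConflictNumList:
-- 		newRect.remove(i)
-- 	return(newTestRect, newRect)
-- ===== SOURCE B (Python) =====
-- def removeImpossible(testRect, rect):
--     # Phase 1: four per-coordinate value sets -> O(1) conflict test per candidate.
--     seen0 = set(); seen1 = set(); seen2 = set(); seen3 = set()
--     for t in testRect:
--         seen0.add(t[0]); seen1.add(t[1]); seen2.add(t[2]); seen3.add(t[3])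
--     newRect = [l for l in rect
--                if l[0] not in seen0 and l[1] not in seen1
--                and l[2] not in seen2 and l[3] not in seen3]
--     n = len(newRect)
--     # Phase 2: hash-grouped next-pointer pass. One backward sweep computes, for
--     # each line i, nxt[i] = smallest j > i sharing a coordinate value with i,
--     # via four value -> next-index dictionaries; no pairwise scan at all.
--     nxt = [None] * n
--     last0 = {}; last1 = {}; last2 = {}; last3 = {}
--     for i in range(n - 1, -1, -1):
--         l = newRect[i]
--         best = None
--         for j in (last0.get(l[0]), last1.get(l[1]), last2.get(l[2]), last3.get(l[3])):
--             if j is not None and (best is None or j < best):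
--                 best = j
--         nxt[i] = best
--         last0[l[0]] = i; last1[l[1]] = i; last2[l[2]] = i; last3[l[3]] = i
--     # A line is eliminated iff it has a later conflict or is the first later
--     # conflict of some earlier line.
--     removed = set()
--     for i in range(n):
--         if nxt[i] is not None:
--             removed.add(i)
--             removed.add(nxt[i])
--     noConflict = [newRect[i] for i in range(n) if i not in removed]
--     conflicted = [newRect[i] for i in range(n) if i in removed]
--     return (testRect + noConflict, conflicted)
-- ===== Notes on version B (the rewrite author's own statement) =====
-- stated objective: faster
-- what changed: B replaces A's quadratic pairwise scan-with-break and value-based list.remove bookkeeping by a single backward sweep that hash-groups lines per coordinate value into next-index dictionaries, computing each line's first later conflict in O(1), and replaces the per-line scan of testRect by four precomputed value sets.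
-- outside the precondition, e.g. on removeImpossible([[0]], []): A returns ([[0]], []), B raises IndexError
import Mathlib
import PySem

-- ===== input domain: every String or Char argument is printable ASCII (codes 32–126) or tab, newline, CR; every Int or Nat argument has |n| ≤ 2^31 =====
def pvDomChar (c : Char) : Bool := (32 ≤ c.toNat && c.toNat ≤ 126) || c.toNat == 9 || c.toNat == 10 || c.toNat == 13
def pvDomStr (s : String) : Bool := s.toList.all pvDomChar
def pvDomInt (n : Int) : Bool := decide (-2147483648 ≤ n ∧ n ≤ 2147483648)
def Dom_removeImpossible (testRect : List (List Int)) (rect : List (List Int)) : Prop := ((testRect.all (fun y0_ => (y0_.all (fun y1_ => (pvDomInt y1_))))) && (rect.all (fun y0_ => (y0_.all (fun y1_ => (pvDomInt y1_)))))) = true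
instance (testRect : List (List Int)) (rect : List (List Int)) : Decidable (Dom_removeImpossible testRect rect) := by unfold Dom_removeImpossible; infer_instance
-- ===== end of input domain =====

-- B replaces A's quadratic pairwise scan and value-based list.remove bookkeeping by a
-- single backward sweep over four value→next-index dictionaries (objective: faster).

-- ===== PORT A =====
-- 'testLine[0] == line[0] or … or testLine[3] == line[3]'; indexing via pyGet?
-- (none models IndexError; Pre_ keeps all rows at length ≥ 4, so it is 'some' there)
def pvConfA (t l : List Int) : Bool :=
  (PySem.List.pyGet? t 0 == PySem.List.pyGet? l 0) || (PySem.List.pyGet? t 1 == PySem.List.pyGet? l 1) ||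
  (PySem.List.pyGet? t 2 == PySem.List.pyGet? l 2) || (PySem.List.pyGet? t 3 == PySem.List.pyGet? l 3)

-- 'for testLine in testRect: if conf: newRect.remove(line); break'; remove is
-- (remove? …).getD … — the default is never taken (the value is present, as in Python)
def pvStep1A (testRect : List (List Int)) (nr : List (List Int)) (line : List Int) : List (List Int) :=
  if testRect.any (fun t => pvConfA t line) then (PySem.List.remove? nr line).getD nr else nr

-- inner 'for j in range(i+1, len(newRect)): … break' = first conflicting j
def pvFind2A (nr : List (List Int)) (i : Nat) : Option Nat :=
  (List.range' (i+1) (nr.length - (i+1))).find? (fun j => pvConfA (nr.getD i []) (nr.getD j []))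

def pvStep2A (nr : List (List Int)) (ncl : List (List Int)) (i : Nat) : List (List Int) :=
  match pvFind2A nr i with
  | none => ncl
  | some j =>
    let iline := nr.getD i []
    let jline := nr.getD j []
    let ncl1 := if iline ∈ ncl then (PySem.List.remove? ncl iline).getD ncl else ncl
    if jline ∈ ncl1 then (PySem.List.remove? ncl1 jline).getD ncl1 else ncl1

def removeImpossible (testRect : List (List Int)) (rect : List (List Int)) : List (List Int) × List (List Int) :=
  let newRect := rect.foldl (pvStep1A testRect) rect
  let noConf := (List.range newRect.length).foldl (pvStep2A newRect) newRect
  (testRect ++ noConf, noConf.foldl (fun nr x => (PySem.List.remove? nr x).getD nr) newRect)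

-- ===== PORT B =====
-- the four per-coordinate value sets built in one pass over testRect
def pvAddSets (s : PySem.Set (Option Int) × PySem.Set (Option Int) × PySem.Set (Option Int) × PySem.Set (Option Int))
    (t : List Int) : PySem.Set (Option Int) × PySem.Set (Option Int) × PySem.Set (Option Int) × PySem.Set (Option Int) :=
  (PySem.Set.add s.1 (PySem.List.pyGet? t 0), PySem.Set.add s.2.1 (PySem.List.pyGet? t 1),
   PySem.Set.add s.2.2.1 (PySem.List.pyGet? t 2), PySem.Set.add s.2.2.2 (PySem.List.pyGet? t 3))

def pvKeepB (s : PySem.Set (Option Int) × PySem.Set (Option Int) × PySem.Set (Option Int) × PySem.Set (Option Int))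
    (l : List Int) : Bool :=
  !(PySem.Set.contains s.1 (PySem.List.pyGet? l 0)) && !(PySem.Set.contains s.2.1 (PySem.List.pyGet? l 1)) &&
  !(PySem.Set.contains s.2.2.1 (PySem.List.pyGet? l 2)) && !(PySem.Set.contains s.2.2.2 (PySem.List.pyGet? l 3))

-- 'if j is not None and (best is None or j < best): best = j', folded left to right
def pvOptMin : Option Nat → Option Nat → Option Nat
  | none, b => b
  | some a, none => some a
  | some a, some b => some (min a b)

-- Source B's backward index loop 'for i in range(n-1, -1, -1)' ported as structural
-- recursion from the right: identical reads (four dict .get) then writes (four dict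
-- assignments) per index, producing the nxt list front-to-back
def pvBackAux : Nat → List (List Int) →
    List (Option Nat) × (PySem.Dict (Option Int) Nat × PySem.Dict (Option Int) Nat × PySem.Dict (Option Int) Nat × PySem.Dict (Option Int) Nat)
  | _, [] => ([], (PySem.Dict.empty, PySem.Dict.empty, PySem.Dict.empty, PySem.Dict.empty))
  | i, l :: rest =>
    let r := pvBackAux (i+1) rest
    let best := pvOptMin (pvOptMin (pvOptMin (PySem.Dict.get? r.2.1 (PySem.List.pyGet? l 0))
      (PySem.Dict.get? r.2.2.1 (PySem.List.pyGet? l 1))) (PySem.Dict.get? r.2.2.2.1 (PySem.List.pyGet? l 2)))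
      (PySem.Dict.get? r.2.2.2.2 (PySem.List.pyGet? l 3))
    (best :: r.1,
     (r.2.1.insert (PySem.List.pyGet? l 0) i, r.2.2.1.insert (PySem.List.pyGet? l 1) i,
      r.2.2.2.1.insert (PySem.List.pyGet? l 2) i, r.2.2.2.2.insert (PySem.List.pyGet? l 3) i))

-- 'if nxt[i] is not None: removed.add(i); removed.add(nxt[i])'
def pvAddRm (nxt : List (Option Nat)) (s : PySem.Set Nat) (i : Nat) : PySem.Set Nat :=
  match nxt.getD i none with
  | none => s
  | some j => PySem.Set.add (PySem.Set.add s i) j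

def removeImpossible_alt (testRect : List (List Int)) (rect : List (List Int)) : List (List Int) × List (List Int) :=
  let s := testRect.foldl pvAddSets (PySem.Set.empty, PySem.Set.empty, PySem.Set.empty, PySem.Set.empty)
  let newRect := rect.filter (pvKeepB s)
  let n := newRect.length
  let nxt := (pvBackAux 0 newRect).1
  let removed := (List.range n).foldl (pvAddRm nxt) (PySem.Set.empty : PySem.Set Nat)
  (testRect ++ ((List.range n).filter (fun i => !(PySem.Set.contains removed i))).map (fun i => newRect.getD i []),
   ((List.range n).filter (fun i => PySem.Set.contains removed i)).map (fun i => newRect.getD i []))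

-- ===== PRECONDITION & SPEC =====
-- Pre_ excludes (a) rows shorter than 4 entries, on which A raises IndexError except in
-- degenerate corners (e.g. empty rect) it happens not to touch, where B raises; and
-- (b) duplicate rows in rect, on which A's value-based list.remove picks accidental copies.
def Pre_removeImpossible (testRect : List (List Int)) (rect : List (List Int)) : Prop :=
  (∀ t ∈ testRect, 4 ≤ t.length) ∧ (∀ l ∈ rect, 4 ≤ l.length) ∧ rect.Nodup
instance (testRect : List (List Int)) (rect : List (List Int)) : Decidable (Pre_removeImpossible testRect rect) := by unfold Pre_removeImpossible; infer_instance

def pvWitness_removeImpossible : List (List Int) × List (List Int) :=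
  ([[0, 1, 2, 3]], [[4, 5, 6, 7], [4, 8, 9, 10], [11, 12, 13, 14]])

def Spec_removeImpossible (testRect : List (List Int)) (rect : List (List Int)) (out : List (List Int) × List (List Int)) : Prop := out = removeImpossible_alt testRect rect
instance (testRect : List (List Int)) (rect : List (List Int)) (out : List (List Int) × List (List Int)) : Decidable (Spec_removeImpossible testRect rect out) := by unfold Spec_removeImpossible; infer_instance

-- ===== CLAIM (what is proved, stated in full; the proofs are below) =====
def Claim_equal_removeImpossible : Prop := ∀ (testRect : List (List Int)) (rect : List (List Int)), Dom_removeImpossible testRect rect → Pre_removeImpossible testRect rect → Spec_removeImpossible testRect rect (removeImpossible testRect rect)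

-- ===== LEMMAS AND PROOFS =====

-- Python's xs.remove(v) (never failing where used here) is List.erase
theorem pvRemoveD (nr : List (List Int)) (x : List Int) :
    (PySem.List.remove? nr x).getD nr = nr.erase x := by
  by_cases h : x ∈ nr
  · rw [PySem.List.remove?_eq_some_erase nr x h, Option.getD_some]
  · rw [(PySem.List.remove?_eq_none_iff nr x).mpr h, Option.getD_none, List.erase_of_not_mem h]

-- phase 1 of A: removing each conflicting line (decided by value) = filter
theorem pvPhase1 (testRect : List (List Int)) :
    ∀ (rest acc : List (List Int)), (∀ x ∈ acc, testRect.any (fun t => pvConfA t x) = false) →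
    rest.foldl (pvStep1A testRect) (acc ++ rest)
      = acc ++ rest.filter (fun l => !testRect.any (fun t => pvConfA t l))
  | [], acc, h => by simp
  | line :: rest, acc, h => by
    rw [List.foldl_cons]
    simp only [List.filter_cons]
    cases hP : testRect.any (fun t => pvConfA t line) with
    | true =>
      have hna : line ∉ acc := fun hx => by rw [h line hx] at hP; cases hP
      have hstep : pvStep1A testRect (acc ++ line :: rest) line = acc ++ rest := by
        unfold pvStep1A
        rw [hP, if_pos rfl, pvRemoveD, List.erase_append_right _ hna, List.erase_cons_head]
      rw [hstep, pvPhase1 testRect rest acc h, if_neg (by simp)]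
    | false =>
      have hstep : pvStep1A testRect (acc ++ line :: rest) line = acc ++ line :: rest := by
        unfold pvStep1A
        rw [hP, if_neg (by simp)]
      have hacc : ∀ x ∈ acc ++ [line], testRect.any (fun t => pvConfA t x) = false := by
        intro x hx
        rcases List.mem_append.mp hx with h' | h'
        · exact h x h'
        · simp only [List.mem_singleton] at h'; subst h'; exact hP
      rw [hstep, show acc ++ line :: rest = (acc ++ [line]) ++ rest by simp,
        pvPhase1 testRect rest (acc ++ [line]) hacc, if_pos (by simp)]
      simp

-- the tuple fold building the four sets, componentwise
theorem pvFold4 :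
    ∀ (tr : List (List Int)) (a b c d : PySem.Set (Option Int)),
    tr.foldl pvAddSets (a, b, c, d)
      = (tr.foldl (fun s t => PySem.Set.add s (PySem.List.pyGet? t 0)) a,
         tr.foldl (fun s t => PySem.Set.add s (PySem.List.pyGet? t 1)) b,
         tr.foldl (fun s t => PySem.Set.add s (PySem.List.pyGet? t 2)) c,
         tr.foldl (fun s t => PySem.Set.add s (PySem.List.pyGet? t 3)) d)
  | [], _, _, _, _ => rfl
  | t :: tr, a, b, c, d => by
    simp only [List.foldl_cons]
    exact pvFold4 tr _ _ _ _

theorem pvContainsAdd {α : Type} [BEq α] [LawfulBEq α] (s : PySem.Set α) (x y : α) :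
    PySem.Set.contains (PySem.Set.add s y) x = (PySem.Set.contains s x || (y == x)) := by
  rw [Bool.eq_iff_iff]
  simp only [Bool.or_eq_true, PySem.Set.contains_iff, PySem.Set.mem_add, beq_iff_eq]
  exact or_congr Iff.rfl eq_comm

theorem pvContainsEmpty {α : Type} [BEq α] [LawfulBEq α] (x : α) :
    PySem.Set.contains (PySem.Set.empty : PySem.Set α) x = false := by
  rw [Bool.eq_iff_iff]
  simp [PySem.Set.contains_iff, PySem.Set.empty]

-- membership in a set built by folding add over testRect
theorem pvContainsFold (k : Int) (x : Option Int) :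
    ∀ (tr : List (List Int)) (s : PySem.Set (Option Int)),
    PySem.Set.contains (tr.foldl (fun s t => PySem.Set.add s (PySem.List.pyGet? t k)) s) x
      = (PySem.Set.contains s x || tr.any (fun t => PySem.List.pyGet? t k == x))
  | [], s => by simp
  | t :: tr, s => by
    simp only [List.foldl_cons, List.any_cons]
    rw [pvContainsFold k x tr, pvContainsAdd, Bool.or_assoc]

theorem pvAny4 (l : List (List Int)) (p q r s : List Int → Bool) :
    l.any (fun t => p t || q t || r t || s t) = (l.any p || l.any q || l.any r || l.any s) := by
  induction l with
  | nil => rfl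
  | cons a as ih =>
    simp only [List.any_cons, ih]
    cases p a <;> cases q a <;> cases r a <;> cases s a <;>
      simp [Bool.or_assoc, Bool.or_comm]

-- the two phase-1 keep-predicates agree
theorem pvKeepEq (testRect : List (List Int)) (l : List Int) :
    pvKeepB (testRect.foldl pvAddSets
      (PySem.Set.empty, PySem.Set.empty, PySem.Set.empty, PySem.Set.empty)) l
      = !(testRect.any (fun t => pvConfA t l)) := by
  rw [pvFold4]
  unfold pvKeepB pvConfA
  rw [pvAny4 testRect _ _ _ _]
  simp only [pvContainsFold, pvContainsEmpty, Bool.false_or, Bool.not_or]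

-- a filter over values as a filter over indices
theorem pvFilterIdx {alpha : Type} (l : List alpha) (p : alpha → Bool) (d : alpha) :
    l.filter p = ((List.range l.length).filter (fun k => p (l.getD k d))).map (fun k => l.getD k d) := by
  induction l with
  | nil => simp
  | cons x xs ih =>
    rw [List.length_cons, List.range_succ_eq_map]
    by_cases hp : p x <;>
      simp [hp, List.filter_map, List.map_map, Function.comp_def,
        List.getElem?_cons_succ, ih]

-- positions of a Nodup list carry distinct values
theorem pvGetDInj (nr : List (List Int)) (h : nr.Nodup) {k i : Nat}
    (hk : k < nr.length) (hi : i < nr.length) :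
    nr.getD k [] = nr.getD i [] ↔ k = i := by
  rw [List.getD_eq_getElem nr [] hk, List.getD_eq_getElem nr [] hi]
  exact h.getElem_inj_iff

theorem pvGetDSet (rm : List Bool) (i k : Nat) (hi : i < rm.length) :
    (rm.set i true).getD k false = if k = i then true else rm.getD k false := by
  by_cases hk : k = i
  · subst hk
    rw [if_pos rfl, List.getD_eq_getElem?_getD, List.getElem?_set_self (by omega), Option.getD_some]
  · rw [if_neg hk, List.getD_eq_getElem?_getD, List.getElem?_set_ne (fun he => hk he.symm),
      List.getD_eq_getElem?_getD]

-- the values of nr at the indices whose flag is still false / already true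
def pvView (nr : List (List Int)) (rm : List Bool) : List (List Int) :=
  ((List.range nr.length).filter (fun k => !(rm.getD k false))).map (fun k => nr.getD k [])
def pvViewT (nr : List (List Int)) (rm : List Bool) : List (List Int) :=
  ((List.range nr.length).filter (fun k => rm.getD k false)).map (fun k => nr.getD k [])

theorem pvMemView (nr : List (List Int)) (rm : List Bool) (h : nr.Nodup) (i : Nat)
    (hi : i < nr.length) :
    nr.getD i [] ∈ pvView nr rm ↔ rm.getD i false = false := by
  unfold pvView
  simp only [List.mem_map, List.mem_filter, List.mem_range]
  constructor
  · rintro ⟨k, ⟨hk, hq⟩, he⟩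
    obtain rfl := (pvGetDInj nr h hk hi).mp he
    simpa using hq
  · intro hq
    exact ⟨i, ⟨hi, by rw [hq]; rfl⟩, rfl⟩

theorem pvEraseView (nr : List (List Int)) (h : nr.Nodup) :
    ∀ (idx : List Nat) (rm : List Bool) (i : Nat), i < nr.length → i < rm.length →
    idx.Nodup → (∀ k ∈ idx, k < nr.length) →
    ((idx.filter (fun k => !(rm.getD k false))).map (fun k => nr.getD k [])).erase (nr.getD i [])
      = (idx.filter (fun k => !((rm.set i true).getD k false))).map (fun k => nr.getD k [])
  | [], rm, i, hi, hirm, hnd, hmem => by simp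
  | k :: idx, rm, i, hi, hirm, hnd, hmem => by
    have hk : k < nr.length := hmem k (List.mem_cons_self)
    have hidx : ∀ k' ∈ idx, k' < nr.length := fun k' hk' => hmem k' (List.mem_cons_of_mem _ hk')
    have hndi : idx.Nodup := hnd.of_cons
    have hrec := pvEraseView nr h idx rm i hi hirm hndi hidx
    simp only [List.filter_cons]
    rw [pvGetDSet rm i k hirm]
    by_cases hki : k = i
    · rw [if_pos hki]
      cases hf : rm.getD k false with
      | true =>
        rw [if_neg (by simp), if_neg (by simp)]
        exact hrec
      | false =>
        rw [if_pos (by simp), if_neg (by simp), List.map_cons, hki, List.erase_cons_head]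
        congr 1
        apply List.filter_congr
        intro k' hk'
        have hne : k' ≠ i := fun he => (List.nodup_cons.mp hnd).1 (by rw [hki, ← he]; exact hk')
        rw [pvGetDSet rm i k' hirm, if_neg hne]
    · rw [if_neg hki]
      cases hf : rm.getD k false with
      | true =>
        rw [if_neg (by simp), if_neg (by simp)]
        exact hrec
      | false =>
        rw [if_pos (by simp), if_pos (by simp), List.map_cons, List.map_cons,
          List.erase_cons_tail (by
            simp only [beq_iff_eq]
            exact fun he => hki ((pvGetDInj nr h hk hi).mp he)), hrec]

-- one guarded value-removal of A = setting one flag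
theorem pvStepView (nr : List (List Int)) (rm : List Bool) (h : nr.Nodup) (i : Nat)
    (hi : i < nr.length) (hlen : rm.length = nr.length) :
    (if nr.getD i [] ∈ pvView nr rm
      then (PySem.List.remove? (pvView nr rm) (nr.getD i [])).getD (pvView nr rm)
      else pvView nr rm)
    = pvView nr (rm.set i true) := by
  cases hf : rm.getD i false with
  | true =>
    rw [if_neg (by rw [pvMemView nr rm h i hi, hf]; simp)]
    unfold pvView
    congr 1
    apply List.filter_congr
    intro k hk
    rw [pvGetDSet rm i k (by omega)]
    by_cases hki : k = i
    · rw [if_pos hki, hki, hf]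
    · rw [if_neg hki]
  | false =>
    rw [if_pos ((pvMemView nr rm h i hi).mpr hf), pvRemoveD]
    unfold pvView
    exact pvEraseView nr h (List.range nr.length) rm i hi (by omega) List.nodup_range
      (fun k hk => List.mem_range.mp hk)

theorem pvFind2A_lt (nr : List (List Int)) (i j : Nat) (h : pvFind2A nr i = some j) :
    (i + 1 ≤ j ∧ j < nr.length) := by
  have hm := List.mem_of_find?_eq_some h
  rw [List.mem_range'_1] at hm
  omega

-- proof-side mirror of A's phase-2 loop as a flag array (not part of either port)
def pvStep2B (nr : List (List Int)) (rm : List Bool) (i : Nat) : List Bool :=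
  match pvFind2A nr i with
  | none => rm
  | some j => (rm.set i true).set j true

theorem pvStep2BLen (nr : List (List Int)) (rm : List Bool) (i : Nat) :
    (pvStep2B nr rm i).length = rm.length := by
  unfold pvStep2B
  cases pvFind2A nr i <;> simp

-- the loop invariant of phase 2: A's surviving list is the view of the flag array
theorem pvInv (nr : List (List Int)) (h : nr.Nodup) :
    ∀ (idx : List Nat) (rm : List Bool), rm.length = nr.length → (∀ i ∈ idx, i < nr.length) →
    idx.foldl (pvStep2A nr) (pvView nr rm) = pvView nr (idx.foldl (pvStep2B nr) rm)
  | [], rm, hlen, hmem => rfl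
  | i :: idx, rm, hlen, hmem => by
    have hi : i < nr.length := hmem i (List.mem_cons_self)
    simp only [List.foldl_cons]
    have hstep : pvStep2A nr (pvView nr rm) i = pvView nr (pvStep2B nr rm i) := by
      unfold pvStep2A pvStep2B
      cases hfind : pvFind2A nr i with
      | none => rfl
      | some j =>
        have hj : j < nr.length := (pvFind2A_lt nr i j hfind).2
        show (if nr.getD j [] ∈ (if nr.getD i [] ∈ pvView nr rm
              then (PySem.List.remove? (pvView nr rm) (nr.getD i [])).getD (pvView nr rm)
              else pvView nr rm)
            then _ else _) = _
        rw [pvStepView nr rm h i hi hlen,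
          pvStepView nr (rm.set i true) h j hj (by rw [List.length_set]; exact hlen)]
    rw [hstep]
    exact pvInv nr h idx (pvStep2B nr rm i) (by rw [pvStep2BLen]; exact hlen)
      (fun k hk => hmem k (List.mem_cons_of_mem _ hk))

-- the final flags, characterised pointwise: flagged iff some loop index hits it
theorem pvFlagsAny (nr : List (List Int)) :
    ∀ (idx : List Nat) (rm : List Bool) (l : Nat), rm.length = nr.length →
    (∀ i ∈ idx, i < nr.length) →
    (idx.foldl (pvStep2B nr) rm).getD l false
      = (rm.getD l false || idx.any (fun i => match pvFind2A nr i with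
          | none => false
          | some j => (i == l || j == l)))
  | [], rm, l, hlen, hmem => by simp
  | i :: idx, rm, l, hlen, hmem => by
    have hi : i < nr.length := hmem i (List.mem_cons_self)
    simp only [List.foldl_cons, List.any_cons]
    rw [pvFlagsAny nr idx (pvStep2B nr rm i) l (by rw [pvStep2BLen]; exact hlen)
      (fun k hk => hmem k (List.mem_cons_of_mem _ hk))]
    have hstep : (pvStep2B nr rm i).getD l false
        = (rm.getD l false || (match pvFind2A nr i with
            | none => false
            | some j => (i == l || j == l))) := by
      unfold pvStep2B
      cases hfind : pvFind2A nr i with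
      | none => simp
      | some j =>
        have hj : j < nr.length := (pvFind2A_lt nr i j hfind).2
        rw [pvGetDSet (rm.set i true) j l (by rw [List.length_set]; omega),
          pvGetDSet rm i l (by omega)]
        by_cases hlj : l = j
        · subst hlj; simp
        · by_cases hli : l = i
          · subst hli; simp
          · rw [if_neg hlj, if_neg hli]
            show rm.getD l false = (rm.getD l false || (i == l || j == l))
            rw [beq_eq_false_iff_ne.mpr (Ne.symm hli), beq_eq_false_iff_ne.mpr (Ne.symm hlj)]
            simp
    rw [hstep, Bool.or_assoc]

-- membership in B's removed set, characterised pointwise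
theorem pvContainsFoldRm (nxt : List (Option Nat)) :
    ∀ (idx : List Nat) (s : PySem.Set Nat) (l : Nat),
    PySem.Set.contains (idx.foldl (pvAddRm nxt) s) l
      = (PySem.Set.contains s l || idx.any (fun i => match nxt.getD i none with
          | none => false
          | some j => (i == l || j == l)))
  | [], s, l => by simp
  | i :: idx, s, l => by
    simp only [List.foldl_cons, List.any_cons]
    rw [pvContainsFoldRm nxt idx (pvAddRm nxt s i) l]
    have hstep : PySem.Set.contains (pvAddRm nxt s i) l
        = (PySem.Set.contains s l || (match nxt.getD i none with
            | none => false
            | some j => (i == l || j == l))) := by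
      unfold pvAddRm
      cases nxt.getD i none with
      | none => simp
      | some j =>
        rw [pvContainsAdd, pvContainsAdd, Bool.or_assoc]
    rw [hstep, Bool.or_assoc]

-- pvOptMin commutes with mapping a min-preserving function
theorem pvOptMinMap (f : Nat → Nat) (hf : ∀ a b : Nat, f (min a b) = min (f a) (f b))
    (o1 o2 : Option Nat) :
    pvOptMin (o1.map f) (o2.map f) = (pvOptMin o1 o2).map f := by
  cases o1 <;> cases o2 <;> simp [pvOptMin, hf]

-- the first index satisfying a disjunction is the min of the first indices
theorem pvFindIdxOr {alpha : Type} (p q : alpha → Bool) :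
    ∀ (l : List alpha), l.findIdx? (fun b => p b || q b) = pvOptMin (l.findIdx? p) (l.findIdx? q)
  | [] => rfl
  | x :: l => by
    simp only [List.findIdx?_cons]
    cases hp : p x <;> cases hq : q x
    · simp only [hp, hq, Bool.or_false, if_false, Bool.false_eq_true, reduceIte]
      rw [pvFindIdxOr p q l,
        pvOptMinMap (fun u => u + 1) (fun a b => by simp only []; omega)]
    · cases hfq : l.findIdx? p <;>
        simp [hp, hq, pvOptMin, hfq]
    · cases hfq : l.findIdx? q <;>
        simp [hp, hq, pvOptMin, hfq]
    · simp [hp, hq, pvOptMin]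

-- Boolean equality on Option Int is symmetric
theorem pvBeqComm (a b : Option Int) : (a == b) = (b == a) := by
  rw [Bool.eq_iff_iff]
  simp only [beq_iff_eq]
  exact eq_comm

-- pointwise-equal functions map alike
theorem pvMapExt (o : Option Nat) (f g : Nat → Nat) (h : ∀ u, f u = g u) :
    o.map f = o.map g := by
  cases o <;> simp [h]

-- one backward step of the dictionary recurrence
theorem pvDictStep (d : PySem.Dict (Option Int) Nat) (key : List Int → Option Int)
    (l : List Int) (xs : List (List Int)) (s : Nat) (v : Option Int)
    (ih : d.get? v = (xs.findIdx? (fun b => key b == v)).map (fun u => s + 1 + u)) :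
    (d.insert (key l) s).get? v
      = ((l :: xs).findIdx? (fun b => key b == v)).map (fun u => s + u) := by
  rw [PySem.Dict.get?_insert, List.findIdx?_cons]
  by_cases hv : v = key l
  · rw [if_pos hv, if_pos (by rw [hv]; exact beq_self_eq_true _)]
    simp
  · rw [if_neg hv, if_neg (by simp only [beq_iff_eq]; exact fun he => hv he.symm), ih,
      Option.map_map]
    exact pvMapExt _ _ _ (fun u => by simp only [Function.comp_apply]; omega)

-- the dictionaries after the backward sweep: value -> first index of rest (shifted by s)
theorem pvBackDicts :
    ∀ (xs : List (List Int)) (s : Nat),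
    (∀ (v : Option Int), PySem.Dict.get? (pvBackAux s xs).2.1 v
        = (xs.findIdx? (fun b => PySem.List.pyGet? b 0 == v)).map (fun u => s + u))
    ∧ (∀ (v : Option Int), PySem.Dict.get? (pvBackAux s xs).2.2.1 v
        = (xs.findIdx? (fun b => PySem.List.pyGet? b 1 == v)).map (fun u => s + u))
    ∧ (∀ (v : Option Int), PySem.Dict.get? (pvBackAux s xs).2.2.2.1 v
        = (xs.findIdx? (fun b => PySem.List.pyGet? b 2 == v)).map (fun u => s + u))
    ∧ (∀ (v : Option Int), PySem.Dict.get? (pvBackAux s xs).2.2.2.2 v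
        = (xs.findIdx? (fun b => PySem.List.pyGet? b 3 == v)).map (fun u => s + u))
  | [], s => by
    refine ⟨fun v => ?_, fun v => ?_, fun v => ?_, fun v => ?_⟩ <;>
      simp [pvBackAux, PySem.Dict.get?_empty]
  | l :: xs, s => by
    obtain ⟨ih0, ih1, ih2, ih3⟩ := pvBackDicts xs (s+1)
    refine ⟨fun v => ?_, fun v => ?_, fun v => ?_, fun v => ?_⟩
    · exact pvDictStep _ (fun b => PySem.List.pyGet? b 0) l xs s v (ih0 v)
    · exact pvDictStep _ (fun b => PySem.List.pyGet? b 1) l xs s v (ih1 v)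
    · exact pvDictStep _ (fun b => PySem.List.pyGet? b 2) l xs s v (ih2 v)
    · exact pvDictStep _ (fun b => PySem.List.pyGet? b 3) l xs s v (ih3 v)

-- the nxt list after the backward sweep: first later conflict, as an index shifted by s
theorem pvBackHead :
    ∀ (xs : List (List Int)) (s t : Nat), t < xs.length →
    (pvBackAux s xs).1.getD t none
      = ((xs.drop (t+1)).findIdx? (fun b => pvConfA (xs.getD t []) b)).map
          (fun u => s + t + 1 + u)
  | [], _, t, ht => absurd ht (by simp)
  | l :: xs, s, 0, _ => by
    obtain ⟨ih0, ih1, ih2, ih3⟩ := pvBackDicts xs (s+1)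
    simp only [pvBackAux, List.getD_cons_zero, List.drop_succ_cons, List.drop_zero]
    rw [show (fun b => pvConfA l b)
        = (fun b => (((PySem.List.pyGet? b 0 == PySem.List.pyGet? l 0)
            || (PySem.List.pyGet? b 1 == PySem.List.pyGet? l 1))
            || (PySem.List.pyGet? b 2 == PySem.List.pyGet? l 2))
            || (PySem.List.pyGet? b 3 == PySem.List.pyGet? l 3)) from funext fun b => by
      unfold pvConfA
      rw [pvBeqComm (PySem.List.pyGet? l 0), pvBeqComm (PySem.List.pyGet? l 1),
        pvBeqComm (PySem.List.pyGet? l 2), pvBeqComm (PySem.List.pyGet? l 3)]]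
    rw [pvFindIdxOr, pvFindIdxOr, pvFindIdxOr,
      ih0 (PySem.List.pyGet? l 0), ih1 (PySem.List.pyGet? l 1),
      ih2 (PySem.List.pyGet? l 2), ih3 (PySem.List.pyGet? l 3),
      pvOptMinMap (fun u => s + 1 + u) (fun a b => by simp only []; omega),
      pvOptMinMap (fun u => s + 1 + u) (fun a b => by simp only []; omega),
      pvOptMinMap (fun u => s + 1 + u) (fun a b => by simp only []; omega)]
  | l :: xs, s, t + 1, ht => by
    show (pvBackAux (s+1) xs).1.getD t none = _
    rw [pvBackHead xs (s+1) t (by simpa using ht)]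
    simp only [List.drop_succ_cons, List.getD_cons_succ]
    exact pvMapExt _ _ _ (fun u => by omega)

-- A's inner search, re-indexed over the suffix list
theorem pvFindRange' (a : List Int) (nr : List (List Int)) :
    ∀ (xs : List (List Int)) (s : Nat),
    (∀ t, t < xs.length → nr.getD (s + t) [] = xs.getD t []) →
    (List.range' s xs.length).find? (fun j => pvConfA a (nr.getD j []))
      = (xs.findIdx? (pvConfA a)).map (fun u => s + u)
  | [], s, _ => rfl
  | x :: xs, s, h => by
    rw [List.length_cons, List.range'_succ, List.findIdx?_cons]
    have h0 : nr.getD s [] = x := by simpa using h 0 (by simp)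
    cases hp : pvConfA a x with
    | true =>
      rw [List.find?_cons_of_pos (by rw [h0]; exact hp), if_pos rfl]
      simp
    | false =>
      rw [List.find?_cons_of_neg (by rw [h0]; simp [hp]), if_neg (by simp [hp]),
        pvFindRange' a nr xs (s+1) (fun t ht => by
          have := h (t+1) (by simpa using ht)
          rw [show s + (t+1) = s + 1 + t by omega] at this
          simpa using this),
        Option.map_map]
      exact pvMapExt _ _ _ (fun u => by simp only [Function.comp_apply]; omega)

theorem pvFindViaDrop (nr : List (List Int)) (i : Nat) :
    pvFind2A nr i
      = ((nr.drop (i+1)).findIdx? (fun b => pvConfA (nr.getD i []) b)).map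
          (fun u => i + 1 + u) := by
  unfold pvFind2A
  rw [show nr.length - (i+1) = (nr.drop (i+1)).length by simp]
  exact pvFindRange' (nr.getD i []) nr (nr.drop (i+1)) (i+1) (fun t ht => by
    rw [List.getD_eq_getElem?_getD, List.getD_eq_getElem?_getD, List.getElem?_drop])

theorem pvBackLen : ∀ (xs : List (List Int)) (s : Nat), (pvBackAux s xs).1.length = xs.length
  | [], _ => rfl
  | l :: xs, s => by
    show ((_ :: (pvBackAux (s+1) xs).1) : List (Option Nat)).length = _
    rw [List.length_cons, pvBackLen xs (s+1), List.length_cons]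

-- B's nxt values are exactly A's first-later-conflict indices
theorem pvNxtEq (nr : List (List Int)) (i : Nat) :
    (pvBackAux 0 nr).1.getD i none = pvFind2A nr i := by
  by_cases hi : i < nr.length
  · rw [pvBackHead nr 0 i hi, pvFindViaDrop nr i]
    exact pvMapExt _ _ _ (fun u => by omega)
  · have h1 : (pvBackAux 0 nr).1.getD i none = none := by
      rw [List.getD_eq_getElem?_getD, List.getElem?_eq_none (by rw [pvBackLen]; omega)]
      rfl
    have h2 : pvFind2A nr i = none := by
      unfold pvFind2A
      rw [show nr.length - (i+1) = 0 from by omega]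
      rfl
    rw [h1, h2]

theorem pvFoldLen (nr : List (List Int)) :
    ∀ (idx : List Nat) (rm : List Bool), (idx.foldl (pvStep2B nr) rm).length = rm.length
  | [], rm => rfl
  | i :: idx, rm => by
    rw [List.foldl_cons, pvFoldLen nr idx, pvStep2BLen]

theorem pvViewReplicate (nr : List (List Int)) :
    pvView nr (List.replicate nr.length false) = nr := by
  unfold pvView
  have h1 : (List.range nr.length).filter
      (fun k => !((List.replicate nr.length false).getD k false)) = List.range nr.length := by
    rw [List.filter_congr (q := fun _ => true) ?_, List.filter_true]
    intro k hk
    have : (List.replicate nr.length false).getD k false = false := by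
      rw [List.getD_eq_getElem?_getD, List.getElem?_replicate]
      split <;> rfl
    rw [this]; rfl
  rw [h1]
  have h2 := pvFilterIdx nr (fun _ => true) []
  simpa using h2.symm

-- phase 3 of A: removing the surviving values from newRect keeps exactly the flagged ones
theorem pvPhase3 (nr : List (List Int)) (rm : List Bool) (h : nr.Nodup) :
    (pvView nr rm).foldl (fun a x => (PySem.List.remove? a x).getD a) nr = pvViewT nr rm := by
  rw [show (fun (a : List (List Int)) (x : List Int) => (PySem.List.remove? a x).getD a)
      = (fun a x => a.erase x) from funext fun a => funext fun x => pvRemoveD a x,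
    ← List.diff_eq_foldl, h.diff_eq_filter, pvFilterIdx nr _ []]
  unfold pvViewT
  congr 1
  apply List.filter_congr
  intro k hk
  have hk' : k < nr.length := List.mem_range.mp hk
  cases hf : rm.getD k false with
  | true =>
    have hnm : nr.getD k [] ∉ pvView nr rm := fun hm => by
      rw [(pvMemView nr rm h k hk').mp hm] at hf; cases hf
    exact decide_eq_true hnm
  | false =>
    have hm : nr.getD k [] ∈ pvView nr rm := (pvMemView nr rm h k hk').mpr hf
    exact decide_eq_false (fun hn => hn hm)

-- the final flags of A's phase 2 agree pointwise with membership in B's removed set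
theorem pvFlagsContains (nr : List (List Int)) (k : Nat) (hk : k < nr.length) :
    ((List.range nr.length).foldl (pvStep2B nr) (List.replicate nr.length false)).getD k false
      = PySem.Set.contains
          ((List.range nr.length).foldl (pvAddRm (pvBackAux 0 nr).1) (PySem.Set.empty : PySem.Set Nat)) k := by
  rw [pvFlagsAny nr (List.range nr.length) (List.replicate nr.length false) k (by simp)
      (fun i hi => List.mem_range.mp hi),
    pvContainsFoldRm (pvBackAux 0 nr).1 (List.range nr.length) PySem.Set.empty k,
    pvContainsEmpty, Bool.false_or]
  have hrep : (List.replicate nr.length false).getD k false = false := by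
    rw [List.getD_eq_getElem?_getD, List.getElem?_replicate]
    split <;> rfl
  rw [hrep, Bool.false_or]
  apply List.any_congr rfl
  intro i
  rw [pvNxtEq nr i]

-- ===== VERDICT (by name: the statement is the Claim_ definition above) =====
theorem removeImpossible_spec : Claim_equal_removeImpossible := by
  intro testRect rect _ hpre
  obtain ⟨ht, hr, hnd⟩ := hpre
  simp only [Spec_removeImpossible, removeImpossible, removeImpossible_alt]
  have h0 := pvPhase1 testRect rect [] (by intro x hx; cases hx)
  simp only [List.nil_append] at h0
  have h1 : rect.foldl (pvStep1A testRect) rect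
      = rect.filter (pvKeepB (testRect.foldl pvAddSets
          (PySem.Set.empty, PySem.Set.empty, PySem.Set.empty, PySem.Set.empty))) := by
    rw [h0]
    exact List.filter_congr fun x _ => (pvKeepEq testRect x).symm
  rw [h1]
  set nr := rect.filter (pvKeepB (testRect.foldl pvAddSets
    (PySem.Set.empty, PySem.Set.empty, PySem.Set.empty, PySem.Set.empty))) with hnr
  have hndnr : nr.Nodup := hnd.filter _
  have h2 := pvInv nr hndnr (List.range nr.length) (List.replicate nr.length false)
    (by simp) (fun k hk => List.mem_range.mp hk)
  rw [pvViewReplicate] at h2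
  rw [h2, pvPhase3 nr _ hndnr]
  have hfilt : ∀ (b : Bool), (List.range nr.length).filter
      (fun k => ((List.range nr.length).foldl (pvStep2B nr) (List.replicate nr.length false)).getD k false == b)
      = (List.range nr.length).filter
        (fun k => PySem.Set.contains
          ((List.range nr.length).foldl (pvAddRm (pvBackAux 0 nr).1) (PySem.Set.empty : PySem.Set Nat)) k == b) := by
    intro b
    apply List.filter_congr
    intro k hk
    rw [pvFlagsContains nr k (List.mem_range.mp hk)]
  have hA : pvView nr ((List.range nr.length).foldl (pvStep2B nr) (List.replicate nr.length false))
      = ((List.range nr.length).filter (fun i => !(PySem.Set.contains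
          ((List.range nr.length).foldl (pvAddRm (pvBackAux 0 nr).1) (PySem.Set.empty : PySem.Set Nat)) i))).map
        (fun i => nr.getD i []) := by
    unfold pvView
    congr 1
    apply List.filter_congr
    intro k hk
    rw [pvFlagsContains nr k (List.mem_range.mp hk)]
  have hB : pvViewT nr ((List.range nr.length).foldl (pvStep2B nr) (List.replicate nr.length false))
      = ((List.range nr.length).filter (fun i => PySem.Set.contains
          ((List.range nr.length).foldl (pvAddRm (pvBackAux 0 nr).1) (PySem.Set.empty : PySem.Set Nat)) i)).map
        (fun i => nr.getD i []) := by
    unfold pvViewT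
    congr 1
    apply List.filter_congr
    intro k hk
    rw [pvFlagsContains nr k (List.mem_range.mp hk)]
  rw [hA, hB]
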